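-- pv_equiv track=rewrite | github.com/cyberLaVoy/leetcode-solutions | python/substrings_of_size_three_with_distinct_characters.py | countGoodSubstrings
-- ===== SOURCE A (Python) =====
-- def countGoodSubstrings(s: str) -> int:
--     """
--     Counts the number of "good" substrings of length 3 in a given string.
--     Where a "good" substring is defined as a substring that contains only distinct characters.
--     Args:
--         s (str): The input string.
--     Returns:
--         int: The count of "good" substrings.
--     """
--     # List to store all size 3 substrings
--     size_three_substrings = []
--     # Generate all size 3 substrings by iterating over the string
--     for i in range(len(s)-2):
--         size_three_substring = s[i:i+3]
--         size_three_substrings.append(size_three_substring)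
--     # List to store good size 3 substrings
--     good_size_three_substrings = []
--     # Check each size 3 substring for goodness
--     for substring in size_three_substrings:
--         # Dictionary to track letters in the substring
--         letter_tracker = {}
--         is_good_substring = True
--         # Iterate over each letter in the substring
--         for letter in substring:
--             if letter in letter_tracker:
--                 # If the letter is already in the tracker, it's not a good substring
--                 is_good_substring = False
--             else:
--                 # Add the letter to the tracker
--                 letter_tracker[letter] = 0
--         if is_good_substring:
--             # If the substring is good, add it to the list of good substrings
--             good_size_three_substrings.append(substring)
--     # Return the count of good substrings
--     return len(good_size_three_substrings)
-- ===== SOURCE B (Python) =====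
-- def countGoodSubstrings(s: str) -> int:
--     # Incremental sliding window: maintain a frequency dict of the current
--     # 3-char window across the scan instead of examining each triple afresh.
--     if len(s) < 3:
--         return 0
--     freq = {}
--     for ch in s[:3]:
--         freq[ch] = freq.get(ch, 0) + 1
--     count = 1 if len(freq) == 3 else 0
--     for out, inc in zip(s, s[3:]):
--         freq[out] -= 1
--         if freq[out] == 0:
--             del freq[out]
--         freq[inc] = freq.get(inc, 0) + 1
--         if len(freq) == 3:
--             count += 1
--     return count
-- ===== Notes on version B (the rewrite author's own statement) =====
-- stated objective: alternative
-- what changed: Replaces A's staged passes (materialize every length-3 slice, then re-scan each slice with a fresh dict tracker, then collect good slices and take the length) with an incremental sliding window that threads one frequency dict across the scan, decrementing/deleting the outgoing character and inserting the incoming one, counting whenever the dict holds exactly 3 keys.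
import Mathlib
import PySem

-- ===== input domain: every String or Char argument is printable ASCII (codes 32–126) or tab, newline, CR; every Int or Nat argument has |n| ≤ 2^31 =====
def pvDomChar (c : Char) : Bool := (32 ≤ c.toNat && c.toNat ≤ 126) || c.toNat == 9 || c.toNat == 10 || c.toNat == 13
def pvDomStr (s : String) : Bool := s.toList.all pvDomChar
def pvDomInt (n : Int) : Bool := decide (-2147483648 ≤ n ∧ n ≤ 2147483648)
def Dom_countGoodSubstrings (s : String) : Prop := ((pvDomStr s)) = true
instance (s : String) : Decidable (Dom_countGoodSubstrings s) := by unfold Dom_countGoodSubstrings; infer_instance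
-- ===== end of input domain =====

-- B replaces A's staged passes (collect all length-3 slices, re-scan each with a fresh dict) by one
-- incremental sliding window threading a frequency dict across the scan; objective: alternative.

-- ===== PORT A =====
-- the 'for letter in substring' tracker loop of A
def pvTrackA (st : PySem.Dict Char Int × Bool) (letter : Char) : PySem.Dict Char Int × Bool :=
  if st.1.contains letter then (st.1, false) else (st.1.insert letter 0, st.2)

def countGoodSubstrings (s : String) : Int :=
  let l := s.toList
  let sizeThree := (PySem.List.pyRange 0 ((l.length : Int) - 2) 1).foldl
    (fun acc i => acc ++ [PySem.List.slice l (some i) (some (i + 3))]) []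
  let goods := sizeThree.foldl
    (fun acc sub => if (sub.foldl pvTrackA (PySem.Dict.empty, true)).2 then acc ++ [sub] else acc) []
  (goods.length : Int)

-- ===== PORT B =====
-- one slide of Source B's window loop: decrement the outgoing char (Source B's 'freq[out] -= 1' always finds
-- the key, since out is in the current window, so getD is exact there), delete it when its count
-- reaches 0, add the incoming char, and bump the count when the dict holds exactly 3 keys
def pvSlideB (st : PySem.Dict Char Int × Int) (p : Char × Char) : PySem.Dict Char Int × Int :=
  let d1 := st.1.insert p.1 (st.1.getD p.1 0 - 1)
  let d2 := if d1.getD p.1 0 == 0 then d1.erase p.1 else d1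
  let d3 := d2.insert p.2 (d2.getD p.2 0 + 1)
  (d3, if d3.size == 3 then st.2 + 1 else st.2)

def countGoodSubstrings_alt (s : String) : Int :=
  let l := s.toList
  if l.length < 3 then 0
  else
    let freq := (l.take 3).foldl (fun d ch => d.insert ch (d.getD ch 0 + 1)) PySem.Dict.empty
    let count : Int := if freq.size == 3 then 1 else 0
    ((l.zip (l.drop 3)).foldl pvSlideB (freq, count)).2

-- ===== PRECONDITION & SPEC =====
def Spec_countGoodSubstrings (s : String) (out : Int) : Prop := out = countGoodSubstrings_alt s
instance (s : String) (out : Int) : Decidable (Spec_countGoodSubstrings s out) := by unfold Spec_countGoodSubstrings; infer_instance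

-- ===== CLAIM (what is proved, stated in full; the proofs are below) =====
def Claim_equal_countGoodSubstrings : Prop := ∀ (s : String), Dom_countGoodSubstrings s → Spec_countGoodSubstrings s (countGoodSubstrings s)

-- ===== LEMMAS AND PROOFS =====

-- A's value on the underlying character list
def pvCountA (l : List Char) : Int :=
  ((((List.range (l.length - 2)).map (fun k => (l.drop k).take 3)).filter
      (fun sub => (sub.foldl pvTrackA (PySem.Dict.empty, true)).2)).length : Int)

lemma pvCountA_eq (s : String) : countGoodSubstrings s = pvCountA s.toList := by
  unfold countGoodSubstrings pvCountA
  dsimp only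
  rw [PySem.List.pyRange_one]
  rw [PySem.List.foldl_append_singleton_eq_map, List.map_map]
  rw [PySem.List.foldl_append_if_eq_filter]
  simp only [List.nil_append]
  have hn : (((s.toList.length : Int)) - 2 - 0).toNat = s.toList.length - 2 := by omega
  rw [hn]
  have hmap : (List.range (s.toList.length - 2)).map
        ((fun i => PySem.List.slice s.toList (some i) (some (i + 3))) ∘ (fun k : Nat => (0 : Int) + (k : Int)))
      = (List.range (s.toList.length - 2)).map (fun k => (s.toList.drop k).take 3) := by
    apply List.map_congr_left
    intro k _
    show PySem.List.slice s.toList (some ((0 : Int) + (k : Int))) (some ((0 : Int) + (k : Int) + 3)) = _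
    rw [show (0 : Int) + (k : Int) = ((k : Nat) : Int) by omega,
        show ((k : Nat) : Int) + 3 = (((k + 3 : Nat)) : Int) by omega,
        PySem.List.slice_natCast]
    congr 1
    omega
  rw [hmap]

lemma pvGood3 (a b c : Char) :
    (([a, b, c]).foldl pvTrackA (PySem.Dict.empty, true)).2
      = decide (a ≠ b ∧ b ≠ c ∧ a ≠ c) := by
  simp only [List.foldl_cons, List.foldl_nil, pvTrackA, PySem.Dict.contains_empty,
    Bool.false_eq_true, if_false]
  by_cases hba : b = a <;> by_cases hcb : c = b <;> by_cases hca : c = a <;>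
    simp [PySem.Dict.contains_insert, hba, hcb, hca] <;> aesop

lemma pvCountA_cons (a b c : Char) (t : List Char) :
    pvCountA (a :: b :: c :: t)
      = (if a ≠ b ∧ b ≠ c ∧ a ≠ c then 1 else 0) + pvCountA (b :: c :: t) := by
  unfold pvCountA
  simp only [List.length_cons]
  rw [show (t.length + 1 + 1 + 1 - 2) = (t.length + 1) by omega, List.range_succ_eq_map]
  simp only [List.map_cons, List.map_map, List.filter_cons, List.drop_zero, List.take_succ_cons,
    List.take_zero]
  rw [pvGood3]
  have hmap : ((fun k => (List.drop k (a :: b :: c :: t)).take 3) ∘ Nat.succ)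
      = (fun k => (List.drop k (b :: c :: t)).take 3) := rfl
  rw [hmap, show t.length + 1 + 1 - 2 = t.length from rfl]
  by_cases hg : a ≠ b ∧ b ≠ c ∧ a ≠ c <;> simp [hg] <;> push_cast <;> ring

lemma pvCountA_short (l : List Char) (h : l.length ≤ 2) : pvCountA l = 0 := by
  unfold pvCountA
  rw [show l.length - 2 = 0 by omega]
  simp

-- PySem has no erase lemmas; these three are proved here from erase's definition
lemma pvFind?_filter {κ ν : Type} [BEq κ] [LawfulBEq κ] [DecidableEq κ]
    (items : List (κ × ν)) (k k' : κ) :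
    List.find? (fun p => p.1 == k') (items.filter (fun p => !(p.1 == k)))
      = if k' = k then none else List.find? (fun p => p.1 == k') items := by
  by_cases hkk : k' = k
  · subst hkk
    rw [if_pos rfl, List.find?_eq_none]
    intro x hx
    simp only [List.mem_filter] at hx
    simpa using hx.2
  · rw [if_neg hkk]
    induction items with
    | nil => rfl
    | cons p rest ih =>
      by_cases hpk : p.1 = k
      · have hk : (k == k') = false := beq_eq_false_iff_ne.2 (fun hh => hkk hh.symm)
        simp [List.filter_cons, List.find?_cons, hpk, hk, ih]
      · by_cases hpk' : p.1 = k'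
        · simp [List.filter_cons, List.find?_cons, hpk, hpk', hkk]
        · simp [List.filter_cons, List.find?_cons, hpk, hpk', ih]

lemma pvGet?_erase {κ ν : Type} [BEq κ] [LawfulBEq κ] [DecidableEq κ]
    (d : PySem.Dict κ ν) (k k' : κ) :
    (d.erase k).get? k' = if k' = k then none else d.get? k' := by
  obtain ⟨items⟩ := d
  simp only [PySem.Dict.erase, PySem.Dict.get?, pvFind?_filter]
  split <;> rfl

lemma pvGetD_erase (d : PySem.Dict Char Int) (k k' : Char) (d0 : Int) :
    (d.erase k).getD k' d0 = if k' = k then d0 else d.getD k' d0 := by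
  simp only [PySem.Dict.getD, pvGet?_erase]
  split <;> rfl

lemma pvKeys_erase {κ ν : Type} [BEq κ] (d : PySem.Dict κ ν) (k : κ) :
    (d.erase k).keys = d.keys.filter (fun x => !(x == k)) := by
  obtain ⟨items⟩ := d
  simp only [PySem.Dict.erase, PySem.Dict.keys, List.filter_map]
  rfl

-- the sliding-window invariant: d is (extensionally) the frequency dict of the window w
def pvInv (d : PySem.Dict Char Int) (w : List Char) : Prop :=
  d.keys.Nodup ∧ (∀ ch, d.getD ch 0 = (w.count ch : Int)) ∧ (∀ ch, ch ∈ d.keys ↔ ch ∈ w)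

lemma pvInv_counter (w : List Char) : pvInv (PySem.Dict.counter w) w :=
  ⟨PySem.Dict.nodup_keys_counter w, fun ch => PySem.Dict.getD_counter w ch,
   fun ch => by rw [PySem.Dict.keys_counter]; exact PySem.Set.mem_ofList w ch⟩

lemma pvInv_size (d : PySem.Dict Char Int) (w : List Char) (h : pvInv d w) :
    d.size = (PySem.Set.ofList w).length := by
  have hperm : d.keys.Perm (PySem.Set.ofList w) :=
    (List.perm_ext_iff_of_nodup h.1 (PySem.Set.nodup_ofList w)).2
      (fun a => (h.2.2 a).trans (PySem.Set.mem_ofList w a).symm)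
  have hlen : d.size = d.keys.length := by
    simp [PySem.Dict.size, PySem.Dict.keys]
  rw [hlen, hperm.length_eq]

lemma pvSize3 (a b c : Char) :
    ((PySem.Set.ofList [a, b, c]).length = 3) ↔ (a ≠ b ∧ b ≠ c ∧ a ≠ c) := by
  by_cases h1 : b = a <;> by_cases h2 : c = a <;> by_cases h3 : c = b <;>
    simp [PySem.Set.ofList, PySem.Set.add, PySem.Set.empty, h1, h2, h3] <;> aesop

lemma pvInv_add (d : PySem.Dict Char Int) (w : List Char) (e : Char) (h : pvInv d w) :
    pvInv (d.insert e (d.getD e 0 + 1)) (w ++ [e]) := by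
  obtain ⟨hnd, hcnt, hmem⟩ := h
  refine ⟨PySem.Dict.nodup_keys_insert _ _ _ hnd, fun ch => ?_, fun ch => ?_⟩
  · rw [PySem.Dict.getD_insert]
    by_cases hch : ch = e
    · subst hch; simp [hcnt, List.count_append]
    · simp [hch, hcnt, List.count_append, List.count_singleton, Ne.symm hch]
  · rw [PySem.Dict.mem_keys_insert, hmem]
    simp [or_comm]

lemma pvInv_remove (d : PySem.Dict Char Int) (a : Char) (w : List Char) (h : pvInv d (a :: w)) :
    pvInv (if (d.insert a (d.getD a 0 - 1)).getD a 0 == 0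
           then (d.insert a (d.getD a 0 - 1)).erase a
           else d.insert a (d.getD a 0 - 1)) w := by
  obtain ⟨hnd, hcnt, hmem⟩ := h
  have hd1 : ∀ ch, (d.insert a (d.getD a 0 - 1)).getD ch 0 = (w.count ch : Int) := by
    intro ch
    rw [PySem.Dict.getD_insert]
    by_cases hch : ch = a
    · subst hch; simp [hcnt]
    · simp [hch, hcnt, List.count_cons, Ne.symm hch]
  have hd1nd : (d.insert a (d.getD a 0 - 1)).keys.Nodup := PySem.Dict.nodup_keys_insert _ _ _ hnd
  have hd1mem : ∀ ch, ch ∈ (d.insert a (d.getD a 0 - 1)).keys ↔ ch ∈ a :: w := by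
    intro ch
    rw [PySem.Dict.mem_keys_insert, hmem]
    simp [List.mem_cons]
  by_cases hz : w.count a = 0
  · have ha : a ∉ w := List.count_eq_zero.1 hz
    rw [if_pos (by simp [hd1, hz])]
    refine ⟨?_, fun ch => ?_, fun ch => ?_⟩
    · rw [pvKeys_erase]; exact hd1nd.filter _
    · rw [pvGetD_erase]
      by_cases hch : ch = a
      · subst hch; simp [hz]
      · simp [hch, hd1]
    · rw [pvKeys_erase, List.mem_filter]
      constructor
      · rintro ⟨hm, hne⟩
        have hne' : ch ≠ a := by simpa using hne
        rcases List.mem_cons.1 ((hd1mem ch).1 hm) with rfl | hw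
        · exact absurd rfl hne'
        · exact hw
      · intro hch
        refine ⟨(hd1mem ch).2 (List.mem_cons.2 (Or.inr hch)), ?_⟩
        have hne : ch ≠ a := fun hh => ha (hh ▸ hch)
        simpa using hne
  · have ha : a ∈ w := by
      by_contra hna
      exact hz (List.count_eq_zero.2 hna)
    rw [if_neg (by simp [hd1, hz])]
    refine ⟨hd1nd, hd1, fun ch => ?_⟩
    rw [hd1mem]
    constructor
    · intro hm
      rcases List.mem_cons.1 hm with rfl | hw
      · exact ha
      · exact hw
    · exact fun hw => List.mem_cons.2 (Or.inr hw)

lemma pvSlideB_dict (d : PySem.Dict Char Int) (cnt : Int) (a b c e : Char)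
    (h : pvInv d [a, b, c]) :
    pvInv (pvSlideB (d, cnt) (a, e)).1 [b, c, e] := by
  have h2 := pvInv_remove d a [b, c] h
  have h3 := pvInv_add _ [b, c] e h2
  simpa [pvSlideB] using h3

lemma pvSlideB_cnt (d : PySem.Dict Char Int) (cnt : Int) (a b c e : Char)
    (h : pvInv d [a, b, c]) :
    (pvSlideB (d, cnt) (a, e)).2 = cnt + (if b ≠ c ∧ c ≠ e ∧ b ≠ e then 1 else 0) := by
  have hdict := pvSlideB_dict d cnt a b c e h
  have hsize := pvInv_size _ _ hdict
  have hiff := pvSize3 b c e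
  show (if (pvSlideB (d, cnt) (a, e)).1.size == 3 then cnt + 1 else cnt) = _
  by_cases hg : b ≠ c ∧ c ≠ e ∧ b ≠ e
  · rw [if_pos (by simp [hsize, hiff.2 hg]), if_pos hg]
  · rw [if_neg (by simp only [beq_iff_eq, hsize]; exact fun hc => hg (hiff.1 hc)), if_neg hg]
    simp

lemma pvFold (t : List Char) : ∀ (a b c : Char) (d : PySem.Dict Char Int) (cnt : Int),
    pvInv d [a, b, c] →
    (((a :: b :: c :: t).zip t).foldl pvSlideB (d, cnt)).2 = cnt + pvCountA (b :: c :: t) := by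
  induction t with
  | nil =>
    intro a b c d cnt _
    simp [pvCountA_short [b, c] (by simp)]
  | cons e t ih =>
    intro a b c d cnt h
    rw [show (a :: b :: c :: e :: t).zip (e :: t) = (a, e) :: (b :: c :: e :: t).zip t
        from List.zip_cons_cons, List.foldl_cons]
    have hd := pvSlideB_dict d cnt a b c e h
    have hc := pvSlideB_cnt d cnt a b c e h
    rw [← Prod.mk.eta (p := pvSlideB (d, cnt) (a, e))]
    rw [ih b c e _ _ hd, hc, pvCountA_cons b c e t]
    ring

-- ===== VERDICT (by name: the statement is the Claim_ definition above) =====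
theorem countGoodSubstrings_spec : Claim_equal_countGoodSubstrings := by
  intro s _
  unfold Spec_countGoodSubstrings countGoodSubstrings_alt
  rw [pvCountA_eq s]
  dsimp only
  generalize s.toList = l
  by_cases hlen : l.length < 3
  · rw [if_pos hlen, pvCountA_short l (by omega)]
  · rw [if_neg hlen]
    rcases l with _ | ⟨a, _ | ⟨b, _ | ⟨c, t⟩⟩⟩
    · exact absurd (by norm_num) hlen
    · exact absurd (by norm_num) hlen
    · exact absurd (by norm_num) hlen
    · simp only [List.take_succ_cons, List.take_zero, List.drop_succ_cons, List.drop_zero,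
        PySem.Dict.foldl_insert_getD_add_one_eq_counter]
      have hinv := pvInv_counter [a, b, c]
      have hcond : (((PySem.Dict.counter [a, b, c]).size == 3) = true)
          ↔ (a ≠ b ∧ b ≠ c ∧ a ≠ c) := by
        rw [beq_iff_eq, pvInv_size _ _ hinv]
        exact pvSize3 a b c
      rw [pvFold t a b c _ _ hinv, pvCountA_cons a b c t]
      by_cases hg : a ≠ b ∧ b ≠ c ∧ a ≠ c
      · rw [if_pos hg, if_pos (hcond.2 hg)]
      · rw [if_neg hg, if_neg (fun hh => hg (hcond.1 hh))]
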